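-- pv_equiv track=rewrite | github.com/alina-malkova/sanctions-labor-markets | RFSD_data/analyze_subsector_mechanism.py | classify_firm_product
-- ===== SOURCE A (Python) =====
-- OKVED_TO_PRODUCT = {
--     # Dairy
--     "01.41": "dairy",
--     "01.45": "dairy",
--     "10.51": "dairy",
--     "10.52": "dairy",
--
--     # Beef
--     "01.42": "meat_beef",
--     "10.11": "meat_beef",
--
--     # Pork
--     "01.46": "meat_pork",
--
--     # Poultry
--     "01.47": "meat_poultry",
--
--     # Fruits and vegetables
--     "01.1": "fruits_veg",
--     "01.11": "fruits_veg",
--     "01.13": "fruits_veg",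
--     "01.2": "fruits_veg",
--     "01.21": "fruits_veg",
--     "01.24": "fruits_veg",
--     "01.25": "fruits_veg",
--     "10.3": "fruits_veg",
--     "10.31": "fruits_veg",
--     "10.32": "fruits_veg",
--     "10.39": "fruits_veg",
--
--     # Fish
--     "03": "fish",
--     "03.1": "fish",
--     "03.11": "fish",
--     "03.12": "fish",
--     "03.2": "fish",
--     "10.2": "fish",
--     "10.20": "fish",
-- }
--
-- def classify_firm_product(okved: str) -> str | None:
--     """Classify a firm's OKVED code to embargo product category."""
--     if okved is None:
--         return None
--
--     # Try exact match first
--     if okved in OKVED_TO_PRODUCT: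
--         return OKVED_TO_PRODUCT[okved]
--
--     # Try prefix matches (longer prefixes first)
--     for prefix_len in [5, 4, 3, 2]:
--         if len(okved) >= prefix_len:
--             prefix = okved[:prefix_len]
--             if prefix in OKVED_TO_PRODUCT:
--                 return OKVED_TO_PRODUCT[prefix]
--
--     return None
-- ===== SOURCE B (Python) =====
-- PRODUCT_PREFIXES = [
--     ("dairy", ["01.41", "01.45", "10.51", "10.52"]),
--     ("meat_beef", ["01.42", "10.11"]),
--     ("meat_pork", ["01.46"]),
--     ("meat_poultry", ["01.47"]),
--     ("fruits_veg", ["01.1", "01.11", "01.13", "01.2", "01.21", "01.24",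
--                     "01.25", "10.3", "10.31", "10.32", "10.39"]),
--     ("fish", ["03", "03.1", "03.11", "03.12", "03.2", "10.2", "10.20"]),
-- ]
--
-- def classify_firm_product(okved: str) -> str | None:
--     """Classify a firm's OKVED code to embargo product category."""
--     if okved is None:
--         return None
--     best_len = -1
--     best_cat = None
--     for cat, keys in PRODUCT_PREFIXES:
--         for k in keys:
--             if len(k) > best_len and okved.startswith(k):
--                 best_len = len(k)
--                 best_cat = cat
--     return best_cat
-- ===== Notes on version B (the rewrite author's own statement) =====
-- stated objective: alternative
-- what changed: Instead of an exact dict lookup followed by probing fixed-length prefixes (5,4,3,2) of the input against the code->category dict, B stores the classification as category groups of prefix keys and makes one nested scan over them, keeping the length of the longest key that is a prefix of the input and returning its category.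
import Mathlib
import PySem

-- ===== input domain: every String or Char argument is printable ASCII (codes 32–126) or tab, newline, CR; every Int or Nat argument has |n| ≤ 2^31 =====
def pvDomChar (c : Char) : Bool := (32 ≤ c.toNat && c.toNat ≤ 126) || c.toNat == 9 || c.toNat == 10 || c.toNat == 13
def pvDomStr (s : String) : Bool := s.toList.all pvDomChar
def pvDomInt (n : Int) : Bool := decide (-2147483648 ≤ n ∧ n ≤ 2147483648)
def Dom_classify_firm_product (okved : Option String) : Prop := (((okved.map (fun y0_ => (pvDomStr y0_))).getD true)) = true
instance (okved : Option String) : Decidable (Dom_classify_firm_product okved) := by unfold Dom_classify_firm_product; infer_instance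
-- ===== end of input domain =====

-- B replaces A's exact-lookup-then-probe-fixed-length-prefixes scheme by a category-grouped
-- prefix table scanned once, keeping the longest key that is a prefix of the input (alternative).

-- ===== PORT A =====
-- The module constant OKVED_TO_PRODUCT, as its insertion-ordered association list
-- (keys written as explicit Char lists so the kernel can compute on them).
def pvEntries : List (List Char × String) := [
  (['0', '1', '.', '4', '1'], "dairy"),
  (['0', '1', '.', '4', '5'], "dairy"),
  (['1', '0', '.', '5', '1'], "dairy"),
  (['1', '0', '.', '5', '2'], "dairy"),
  (['0', '1', '.', '4', '2'], "meat_beef"),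
  (['1', '0', '.', '1', '1'], "meat_beef"),
  (['0', '1', '.', '4', '6'], "meat_pork"),
  (['0', '1', '.', '4', '7'], "meat_poultry"),
  (['0', '1', '.', '1'], "fruits_veg"),
  (['0', '1', '.', '1', '1'], "fruits_veg"),
  (['0', '1', '.', '1', '3'], "fruits_veg"),
  (['0', '1', '.', '2'], "fruits_veg"),
  (['0', '1', '.', '2', '1'], "fruits_veg"),
  (['0', '1', '.', '2', '4'], "fruits_veg"),
  (['0', '1', '.', '2', '5'], "fruits_veg"),
  (['1', '0', '.', '3'], "fruits_veg"),
  (['1', '0', '.', '3', '1'], "fruits_veg"),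
  (['1', '0', '.', '3', '2'], "fruits_veg"),
  (['1', '0', '.', '3', '9'], "fruits_veg"),
  (['0', '3'], "fish"),
  (['0', '3', '.', '1'], "fish"),
  (['0', '3', '.', '1', '1'], "fish"),
  (['0', '3', '.', '1', '2'], "fish"),
  (['0', '3', '.', '2'], "fish"),
  (['1', '0', '.', '2'], "fish"),
  (['1', '0', '.', '2', '0'], "fish")]

def pvOKVED : PySem.Dict (List Char) String := PySem.Dict.mk pvEntries

-- okved[:n] is List.take n (exact: n is a nonnegative literal); the early-returning
-- `for prefix_len in [5,4,3,2]` loop is a foldl whose accumulator sticks once it is `some`.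
def classify_firm_product (okved : Option String) : Option String :=
  match okved with
  | none => none
  | some s =>
    let l := s.toList
    match pvOKVED.get? l with
    | some v => some v
    | none =>
      [5, 4, 3, 2].foldl
        (fun acc n =>
          match acc with
          | some v => some v
          | none => if n ≤ l.length then pvOKVED.get? (l.take n) else none)
        none

-- ===== PORT B =====
-- Source B's PRODUCT_PREFIXES: the classification grouped as (category, prefix keys).
def pvGroups : List (String × List String) := [
  ("dairy", ["01.41", "01.45", "10.51", "10.52"]),
  ("meat_beef", ["01.42", "10.11"]),
  ("meat_pork", ["01.46"]),
  ("meat_poultry", ["01.47"]),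
  ("fruits_veg", ["01.1", "01.11", "01.13", "01.2", "01.21", "01.24",
                  "01.25", "10.3", "10.31", "10.32", "10.39"]),
  ("fish", ["03", "03.1", "03.11", "03.12", "03.2", "10.2", "10.20"])]

-- best_len starts at -1 (Int, as in Source B); the nested for-loops are nested foldls over
-- the (best_len, best_cat) state.
def classify_firm_product_alt (okved : Option String) : Option String :=
  match okved with
  | none => none
  | some s =>
    let st := pvGroups.foldl
      (fun st g =>
        g.2.foldl
          (fun st k =>
            if decide (st.1 < (PySem.Str.len k : Int)) && PySem.Str.startswith s k
            then ((PySem.Str.len k : Int), some g.1)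
            else st)
          st)
      (-1, none)
    st.2

-- ===== PRECONDITION & SPEC =====
def Spec_classify_firm_product (okved : Option String) (out : Option String) : Prop := out = classify_firm_product_alt okved
instance (okved : Option String) (out : Option String) : Decidable (Spec_classify_firm_product okved out) := by unfold Spec_classify_firm_product; infer_instance

-- ===== CLAIM (what is proved, stated in full; the proofs are below) =====
def Claim_equal_classify_firm_product : Prop := ∀ (okved : Option String), Dom_classify_firm_product okved → Spec_classify_firm_product okved (classify_firm_product okved)

-- ===== LEMMAS AND PROOFS =====

-- A's body, as a function of the character list of the input.
def pvA (l : List Char) : Option String :=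
  match pvOKVED.get? l with
  | some v => some v
  | none =>
    [5, 4, 3, 2].foldl
      (fun acc n =>
        match acc with
        | some v => some v
        | none => if n ≤ l.length then pvOKVED.get? (l.take n) else none)
      none

lemma pvA_eq (s : String) : classify_firm_product (some s) = pvA s.toList := rfl

-- B's state step over one flattened (key, category) entry, keys as Char lists.
def pvBStep (l : List Char) (st : Int × Option String) (kv : List Char × String) :
    Int × Option String :=
  if decide (st.1 < (kv.1.length : Int)) && PySem.Chars.startswith l kv.1
  then ((kv.1.length : Int), some kv.2)
  else st

-- nested fold over groups = fold over the flattened entry list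
lemma pv_nested (s : String) :
    ∀ (gs : List (String × List String)) (init : Int × Option String),
      gs.foldl
          (fun st g =>
            g.2.foldl
              (fun st k =>
                if decide (st.1 < (PySem.Str.len k : Int)) && PySem.Str.startswith s k
                then ((PySem.Str.len k : Int), some g.1)
                else st)
              st)
          init
        = (gs.flatMap (fun g => g.2.map (fun k => (k, g.1)))).foldl
            (fun st kv =>
              if decide (st.1 < (PySem.Str.len kv.1 : Int)) && PySem.Str.startswith s kv.1
              then ((PySem.Str.len kv.1 : Int), some kv.2)
              else st)
            init := by
  intro gs
  induction gs with
  | nil => intro init; rfl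
  | cons g gs ih =>
    intro init
    simp only [List.flatMap_cons, List.foldl_cons, List.foldl_append, List.foldl_map, ih]

-- the flattened groups are exactly pvEntries, with keys read as Char lists
lemma pv_flat_eq :
    (pvGroups.flatMap (fun g => g.2.map (fun k => (k, g.1)))).map
        (fun e => (e.1.toList, e.2)) = pvEntries := by decide

-- B's body equals the flat fold over pvEntries with pvBStep.
lemma pvB_flat (s : String) :
    classify_firm_product_alt (some s)
      = (pvEntries.foldl (pvBStep s.toList) (-1, none)).2 := by
  show (pvGroups.foldl _ ((-1 : Int), (none : Option String))).2 = _
  rw [pv_nested, ← pv_flat_eq, List.foldl_map]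
  refine congrArg Prod.snd ?_
  apply List.foldl_ext
  intro st kv _
  simp [pvBStep, PySem.Str.len]

-- the argAux-style step: keep the first entry of maximal key length among prefix keys
def pvArgStep (l : List Char) (best : Option (List Char × String)) (kv : List Char × String) :
    Option (List Char × String) :=
  if PySem.Chars.startswith l kv.1
  then List.argAux (fun b c => c.1.length < b.1.length) best kv
  else best

def pvEncode : Option (List Char × String) → Int × Option String
  | none => (-1, none)
  | some e => ((e.1.length : Int), some e.2)

lemma pv_encode_step (l : List Char) (best : Option (List Char × String))
    (kv : List Char × String) :
    pvBStep l (pvEncode best) kv = pvEncode (pvArgStep l best kv) := by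
  cases best with
  | none =>
    by_cases h : PySem.Chars.startswith l kv.1
    · simp [pvBStep, pvEncode, pvArgStep, List.argAux, h,
        show (-1 : Int) < (kv.1.length : Int) by omega]
    · simp [pvBStep, pvEncode, pvArgStep, h]
  | some b =>
    by_cases h : PySem.Chars.startswith l kv.1
    · by_cases hl : b.1.length < kv.1.length
      · have hi : (b.1.length : Int) < (kv.1.length : Int) := by exact_mod_cast hl
        simp [pvBStep, pvEncode, pvArgStep, List.argAux, h, hl, hi]
      · have hi : ¬ ((b.1.length : Int) < (kv.1.length : Int)) := by exact_mod_cast hl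
        simp [pvBStep, pvEncode, pvArgStep, List.argAux, h, hl, hi]
    · simp [pvBStep, pvEncode, pvArgStep, h]

lemma pv_encode_foldl (l : List Char) :
    ∀ (es : List (List Char × String)) (best : Option (List Char × String)),
      es.foldl (pvBStep l) (pvEncode best) = pvEncode (es.foldl (pvArgStep l) best) := by
  intro es
  induction es with
  | nil => intro best; rfl
  | cons e es ih => intro best; simp only [List.foldl_cons, pv_encode_step, ih]

-- B computes the first table entry of maximal key length among those whose key is a prefix of l.
lemma pvB_char (s : String) :
    classify_firm_product_alt (some s) =
      match List.argmax (fun e : List Char × String => e.1.length)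
          (pvEntries.filter (fun e => PySem.Chars.startswith s.toList e.1)) with
      | some bkv => some bkv.2
      | none => none := by
  rw [pvB_flat, show ((-1 : Int), (none : Option String)) = pvEncode none from rfl,
    pv_encode_foldl]
  have hstep : pvEntries.foldl (pvArgStep s.toList) none
      = List.argmax (fun e : List Char × String => e.1.length)
          (pvEntries.filter (fun e => PySem.Chars.startswith s.toList e.1)) := by
    rw [List.argmax, List.foldl_filter]
    apply List.foldl_ext
    intro best kv _
    rfl
  rw [hstep]
  cases List.argmax (fun e : List Char × String => e.1.length)
      (pvEntries.filter (fun e => PySem.Chars.startswith s.toList e.1)) <;> rfl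

-- lookup of a key that is present (keys of pvEntries are pairwise distinct)
lemma pv_get?_of_mem {q : List Char} {v : String} (h : (q, v) ∈ pvEntries) :
    pvOKVED.get? q = some v := by
  fin_cases h <;> decide

-- a successful lookup comes from an entry
lemma pv_mem_of_get? {q : List Char} {v : String} (h : pvOKVED.get? q = some v) :
    (q, v) ∈ pvEntries := by
  have h' : (pvEntries.find? (fun p => p.1 == q)).map (fun p => p.2) = some v := h
  rcases Option.map_eq_some_iff.mp h' with ⟨e, hf, hv⟩
  have hmem := List.mem_of_find?_eq_some hf
  have hkey : e.1 = q := by simpa using List.find?_some hf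
  have : e = (q, v) := by
    cases e; simp_all
  rwa [this] at hmem

-- every key of the table has length 2, 4 or 5
lemma pv_len245 : ∀ e ∈ pvEntries, e.1.length = 2 ∨ e.1.length = 4 ∨ e.1.length = 5 := by decide

lemma pv_core (l : List Char) :
    pvA l =
      match List.argmax (fun e : List Char × String => e.1.length)
          (pvEntries.filter (fun e => PySem.Chars.startswith l e.1)) with
      | some bkv => some bkv.2
      | none => none := by
  rcases hm : List.argmax (fun e : List Char × String => e.1.length)
      (pvEntries.filter (fun e => PySem.Chars.startswith l e.1)) with _ | ⟨k, v⟩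
  · -- no key of the table is a prefix of l: both sides are none
    have hnil := List.argmax_eq_none.mp hm
    have hno : ∀ e ∈ pvEntries, ¬ (PySem.Chars.startswith l e.1 = true) :=
      List.filter_eq_nil_iff.mp hnil
    have hget : ∀ q, q <+: l → pvOKVED.get? q = none := by
      intro q hq
      have : pvEntries.find? (fun p => p.1 == q) = none := by
        rw [List.find?_eq_none]
        intro e he hbeq
        have hkey : e.1 = q := by simpa using hbeq
        exact hno e he (by
          simpa [PySem.Chars.startswith, List.isPrefixOf_iff_prefix, hkey] using hq)
      show (pvEntries.find? (fun p => p.1 == q)).map (fun p => p.2) = none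
      simp [this]
    have h0 : pvOKVED.get? l = none := hget l List.prefix_rfl
    have h5 : pvOKVED.get? (l.take 5) = none := hget _ (List.take_prefix 5 l)
    have h4 : pvOKVED.get? (l.take 4) = none := hget _ (List.take_prefix 4 l)
    have h3 : pvOKVED.get? (l.take 3) = none := hget _ (List.take_prefix 3 l)
    have h2 : pvOKVED.get? (l.take 2) = none := hget _ (List.take_prefix 2 l)
    unfold pvA
    simp [h0, h5, h4, h3, h2]
  · -- (k, v) is the first entry of maximal key length whose key is a prefix of l
    have hm' : (k, v) ∈ List.argmax (fun e : List Char × String => e.1.length)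
        (pvEntries.filter (fun e => PySem.Chars.startswith l e.1)) := Option.mem_def.mpr hm
    have hmem : (k, v) ∈ pvEntries.filter (fun e => PySem.Chars.startswith l e.1) :=
      List.argmax_mem hm'
    have hkE : (k, v) ∈ pvEntries := (List.mem_filter.mp hmem).1
    have hkpre : k <+: l := by
      have := (List.mem_filter.mp hmem).2
      simpa [PySem.Chars.startswith, List.isPrefixOf_iff_prefix] using this
    have hklen : k.length ≤ l.length := hkpre.length_le
    have hmax : ∀ e ∈ pvEntries, e.1 <+: l → e.1.length ≤ k.length := by
      intro e he hp
      have hefil : e ∈ pvEntries.filter (fun e => PySem.Chars.startswith l e.1) :=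
        List.mem_filter.mpr ⟨he, by
          simpa [PySem.Chars.startswith, List.isPrefixOf_iff_prefix] using hp⟩
      exact not_lt.mp (List.not_lt_of_mem_argmax (f := fun e : List Char × String => e.1.length) hefil hm')
    have hktake : l.take k.length = k := (List.prefix_iff_eq_take.mp hkpre).symm
    have hget_k : pvOKVED.get? (l.take k.length) = some v := by
      rw [hktake]; exact pv_get?_of_mem hkE
    -- any probe strictly longer than k comes back empty
    have hnone : ∀ n, n ≤ l.length → k.length < n → pvOKVED.get? (l.take n) = none := by
      intro n hn hkn
      rcases hq : pvOKVED.get? (l.take n) with _ | w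
      · rfl
      · exfalso
        have hmemw := pv_mem_of_get? hq
        have : (l.take n).length ≤ k.length := hmax _ hmemw (List.take_prefix n l)
        rw [List.length_take, min_eq_left hn] at this
        omega
    unfold pvA
    rcases hl : pvOKVED.get? l with _ | w
    · -- no exact match: the probe loop finds k's length first
      have h245 : k.length = 2 ∨ k.length = 4 ∨ k.length = 5 := pv_len245 (k, v) hkE
      rcases h245 with hk | hk | hk
      · -- k is the single length-2 key
        have g5 : (if 5 ≤ l.length then pvOKVED.get? (l.take 5) else none) = none := by
          split_ifs with h
          · exact hnone 5 h (by omega)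
          · rfl
        have g4 : (if 4 ≤ l.length then pvOKVED.get? (l.take 4) else none) = none := by
          split_ifs with h
          · exact hnone 4 h (by omega)
          · rfl
        have g3 : (if 3 ≤ l.length then pvOKVED.get? (l.take 3) else none) = none := by
          split_ifs with h
          · exact hnone 3 h (by omega)
          · rfl
        have g2 : pvOKVED.get? (l.take 2) = some v := by rw [← hk]; exact hget_k
        simp only [List.foldl_cons, List.foldl_nil, g5, g4, g3]
        rw [if_pos (by omega : 2 ≤ l.length), g2]
      · -- k has length 4
        have g5 : (if 5 ≤ l.length then pvOKVED.get? (l.take 5) else none) = none := by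
          split_ifs with h
          · exact hnone 5 h (by omega)
          · rfl
        have g4 : pvOKVED.get? (l.take 4) = some v := by rw [← hk]; exact hget_k
        simp only [List.foldl_cons, List.foldl_nil, g5]
        rw [if_pos (by omega : 4 ≤ l.length), g4]
      · -- k has length 5
        have g5 : pvOKVED.get? (l.take 5) = some v := by rw [← hk]; exact hget_k
        simp only [List.foldl_cons, List.foldl_nil]
        rw [if_pos (by omega : 5 ≤ l.length), g5]
    · -- exact match: l itself is a key, so l = k and the values agree
      have hlE := pv_mem_of_get? hl
      have hle : l.length ≤ k.length := hmax _ hlE List.prefix_rfl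
      have hlk : k = l := hkpre.eq_of_length (by omega)
      rw [hlk, List.take_length, hl] at hget_k
      simpa using hget_k

-- ===== VERDICT (by name: the statement is the Claim_ definition above) =====
theorem classify_firm_product_spec : Claim_equal_classify_firm_product := by
  intro okved _
  unfold Spec_classify_firm_product
  cases okved with
  | none => rfl
  | some s => rw [pvA_eq, pv_core, pvB_char]
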